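-- pv_equiv track=rewrite | github.com/HOONTP/TIL | kakao/2023_6_short.py | solution
-- ===== SOURCE A (Python) =====
-- dij = [(1, 0, 'd'), (0, -1, 'l'), (0, 1, 'r'), (-1, 0, 'u')] # [아, 왼, 오, 위]
--
-- def solution(n, m, x, y, r, c, k):
--     def backT(result, x, y, r, c, k, n, m):
--         distance = abs(x-r) + abs(y-c)
--         if k == 0: # finish 안해도 거의 차이 없음
--             answer.append(result)
--             return
--         else:
--             for i, j, w in dij:
--                 dx, dy = x+i, y+j
--                 if 0<dx<=n and 0<dy<=m and (abs(dx-r)+abs(dy-c)) <= k-1: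
--                     backT(result+w, dx, dy, r, c, k-1, n, m)
--                     break
--     answer = []
--     distance = abs(x-r) + abs(y-c)
--     remain = k - distance
--     if remain % 2 == 1 or k < distance:
--         return "impossible"
--     else:
--         backT('', x, y, r, c, k, n, m)
--     return answer[0]
-- ===== SOURCE B (Python) =====
-- def _walk(n, m, x, y, r, c, rem):
--     # pure recursive walker: first feasible move among d,l,r,u, or None when stuck
--     if rem == 0:
--         return ""
--     if 0 < x + 1 <= n and 0 < y <= m and abs(x + 1 - r) + abs(y - c) <= rem - 1:
--         tail = _walk(n, m, x + 1, y, r, c, rem - 1)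
--         return None if tail is None else "d" + tail
--     if 0 < x <= n and 0 < y - 1 <= m and abs(x - r) + abs(y - 1 - c) <= rem - 1:
--         tail = _walk(n, m, x, y - 1, r, c, rem - 1)
--         return None if tail is None else "l" + tail
--     if 0 < x <= n and 0 < y + 1 <= m and abs(x - r) + abs(y + 1 - c) <= rem - 1:
--         tail = _walk(n, m, x, y + 1, r, c, rem - 1)
--         return None if tail is None else "r" + tail
--     if 0 < x - 1 <= n and 0 < y <= m and abs(x - 1 - r) + abs(y - c) <= rem - 1:
--         tail = _walk(n, m, x - 1, y, r, c, rem - 1)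
--         return None if tail is None else "u" + tail
--     return None
--
--
-- def solution(n, m, x, y, r, c, k):
--     dist = abs(x - r) + abs(y - c)
--     if k < dist or (k - dist) % 2:
--         return "impossible"
--     path = _walk(n, m, x, y, r, c, k)
--     return "impossible" if path is None else path
-- ===== Notes on version B (the rewrite author's own statement) =====
-- stated objective: alternative
-- what changed: Replaces the table-driven backtracking that mutates a closure-captured answer list (dij loop + break + answer[0]) with a pure recursive walker: an explicit if/elif chain over the four moves with inlined bounds that returns the string directly, propagating None when stuck.
import Mathlib
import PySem

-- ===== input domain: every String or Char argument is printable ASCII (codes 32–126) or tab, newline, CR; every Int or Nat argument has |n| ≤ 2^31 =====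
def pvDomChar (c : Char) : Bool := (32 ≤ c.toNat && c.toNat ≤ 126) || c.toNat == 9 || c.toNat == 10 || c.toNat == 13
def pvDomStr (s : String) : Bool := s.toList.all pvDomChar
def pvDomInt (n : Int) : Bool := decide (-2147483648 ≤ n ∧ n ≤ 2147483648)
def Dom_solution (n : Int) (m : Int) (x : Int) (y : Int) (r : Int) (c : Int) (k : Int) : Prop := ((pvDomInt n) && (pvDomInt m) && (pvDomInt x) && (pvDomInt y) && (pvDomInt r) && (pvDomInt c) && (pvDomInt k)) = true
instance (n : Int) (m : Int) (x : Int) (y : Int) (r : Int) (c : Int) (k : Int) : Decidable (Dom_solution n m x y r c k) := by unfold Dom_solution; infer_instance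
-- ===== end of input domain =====

-- B replaces A's table-driven backtracking that mutates a closure-captured answer list with a
-- pure recursive walker (explicit if-chain over the four moves, None propagated when stuck);
-- same result, no speed claim.

-- ===== PORT A =====
-- dij = [(1, 0, 'd'), (0, -1, 'l'), (0, 1, 'r'), (-1, 0, 'u')]
def dij : List (Int × Int × Char) := [(1, 0, 'd'), (0, -1, 'l'), (0, 1, 'r'), (-1, 0, 'u')]

-- backT: A's tail recursion. Python appends at most one result to the closure list `answer`;
-- the port returns that list. `k` is a Nat fuel: backT is only ever called with k ≥ 0 (the
-- guard ensures k ≥ distance ≥ 0) and Python decrements k by exactly 1 per call.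
-- result is kept as List Char (PySem's list side of str); `for … break` = first match of dij.
def backT (result : List Char) (x y r c : Int) (k : Nat) (n m : Int) : List (List Char) :=
  match k with
  | 0 => [result]
  | Nat.succ k' =>
    match dij.find? (fun t =>
        decide (0 < x + t.1 ∧ x + t.1 ≤ n ∧ 0 < y + t.2.1 ∧ y + t.2.1 ≤ m ∧
          |x + t.1 - r| + |y + t.2.1 - c| ≤ ((k' : Int) + 1) - 1)) with
    | some (i, j, w) => backT (result ++ [w]) (x + i) (y + j) r c k' n m
    | none => []

def solution (n : Int) (m : Int) (x : Int) (y : Int) (r : Int) (c : Int) (k : Int) : String :=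
  let distance : Int := |x - r| + |y - c|
  let remain : Int := k - distance
  if PySem.Int.mod remain 2 = 1 ∨ k < distance then "impossible"
  else
    -- answer[0]: IndexError when the list is empty — those inputs are excluded by
    -- Pre_solution, so the port's value there is arbitrary ("impossible")
    match backT [] x y r c k.toNat n m with
    | s :: _ => String.ofList s
    | [] => "impossible"

-- ===== PORT B =====
-- _walk: B's pure recursive walker; None (= none) is propagated when no move fits
def walkB (n m x y r c : Int) (rem : Nat) : Option (List Char) :=
  match rem with
  | 0 => some []
  | Nat.succ rem' =>
    if 0 < x + 1 ∧ x + 1 ≤ n ∧ 0 < y ∧ y ≤ m ∧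
        |x + 1 - r| + |y - c| ≤ ((rem' : Int) + 1) - 1 then
      (walkB n m (x + 1) y r c rem').map (fun t => 'd' :: t)
    else if 0 < x ∧ x ≤ n ∧ 0 < y - 1 ∧ y - 1 ≤ m ∧
        |x - r| + |y - 1 - c| ≤ ((rem' : Int) + 1) - 1 then
      (walkB n m x (y - 1) r c rem').map (fun t => 'l' :: t)
    else if 0 < x ∧ x ≤ n ∧ 0 < y + 1 ∧ y + 1 ≤ m ∧
        |x - r| + |y + 1 - c| ≤ ((rem' : Int) + 1) - 1 then
      (walkB n m x (y + 1) r c rem').map (fun t => 'r' :: t)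
    else if 0 < x - 1 ∧ x - 1 ≤ n ∧ 0 < y ∧ y ≤ m ∧
        |x - 1 - r| + |y - c| ≤ ((rem' : Int) + 1) - 1 then
      (walkB n m (x - 1) y r c rem').map (fun t => 'u' :: t)
    else none

def solution_alt (n : Int) (m : Int) (x : Int) (y : Int) (r : Int) (c : Int) (k : Int) : String :=
  let dist : Int := |x - r| + |y - c|
  if k < dist ∨ PySem.Int.mod (k - dist) 2 ≠ 0 then "impossible"
  else
    match walkB n m x y r c k.toNat with
    | some path => String.ofList path
    | none => "impossible"

-- ===== PRECONDITION & SPEC =====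
-- Pre_solution is exactly the set of inputs on which Python A returns normally: either the
-- "impossible" guard fires, or k = 0, or the target is on the board, some first move is
-- feasible, and (unless k = 1) the board has at least two cells so waiting moves exist;
-- outside it A's answer list stays empty and answer[0] raises IndexError.
def Pre_solution (n : Int) (m : Int) (x : Int) (y : Int) (r : Int) (c : Int) (k : Int) : Prop :=
  PySem.Int.mod (k - (|x - r| + |y - c|)) 2 = 1 ∨ k < |x - r| + |y - c| ∨ k = 0 ∨
  (1 ≤ r ∧ r ≤ n ∧ 1 ≤ c ∧ c ≤ m ∧ (2 ≤ n ∨ 2 ≤ m ∨ k = 1) ∧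
    ∃ t ∈ dij, 0 < x + t.1 ∧ x + t.1 ≤ n ∧ 0 < y + t.2.1 ∧ y + t.2.1 ≤ m ∧
      |x + t.1 - r| + |y + t.2.1 - c| ≤ k - 1)
instance (n : Int) (m : Int) (x : Int) (y : Int) (r : Int) (c : Int) (k : Int) : Decidable (Pre_solution n m x y r c k) := by unfold Pre_solution; infer_instance

def pvWitness_solution : Int × Int × Int × Int × Int × Int × Int := (3, 3, 1, 1, 3, 3, 6)

def Spec_solution (n : Int) (m : Int) (x : Int) (y : Int) (r : Int) (c : Int) (k : Int) (out : String) : Prop := out = solution_alt n m x y r c k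
instance (n : Int) (m : Int) (x : Int) (y : Int) (r : Int) (c : Int) (k : Int) (out : String) : Decidable (Spec_solution n m x y r c k out) := by unfold Spec_solution; infer_instance

-- ===== CLAIM (what is proved, stated in full; the proofs are below) =====
def Claim_equal_solution : Prop := ∀ (n : Int) (m : Int) (x : Int) (y : Int) (r : Int) (c : Int) (k : Int), Dom_solution n m x y r c k → Pre_solution n m x y r c k → Spec_solution n m x y r c k (solution n m x y r c k)
-- ===== LEMMAS AND PROOFS =====

-- A's recursion and B's walker compute the same partial path (unconditionally: A's stuck
-- branch yields the empty answer list exactly when B's walker yields none)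
lemma backT_eq_walk (n m r c : Int) : ∀ (kn : Nat) (x y : Int) (acc : List Char),
    backT acc x y r c kn n m =
      (match walkB n m x y r c kn with
       | some s => [acc ++ s]
       | none => []) := by
  intro kn
  induction kn with
  | zero => intro x y acc; simp [backT, walkB]
  | succ k' ih =>
    intro x y acc
    rw [backT, walkB]
    simp only [dij, List.find?]
    simp only [← sub_eq_add_neg, add_zero]
    by_cases h1 : 0 < x + 1 ∧ x + 1 ≤ n ∧ 0 < y ∧ y ≤ m ∧
        |x + 1 - r| + |y - c| ≤ (k' : Int) + 1 - 1
    · simp only [decide_eq_true h1, if_pos h1]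
      simp only [add_zero]
      rw [ih (x + 1) y (acc ++ ['d'])]
      cases walkB n m (x + 1) y r c k' <;> simp
    · simp only [decide_eq_false h1, if_neg h1]
      by_cases h2 : 0 < x ∧ x ≤ n ∧ 0 < y - 1 ∧ y - 1 ≤ m ∧
          |x - r| + |y - 1 - c| ≤ (k' : Int) + 1 - 1
      · simp only [decide_eq_true h2, if_pos h2]
        simp only [add_zero, ← sub_eq_add_neg]
        rw [ih x (y - 1) (acc ++ ['l'])]
        cases walkB n m x (y - 1) r c k' <;> simp
      · simp only [decide_eq_false h2, if_neg h2]
        by_cases h3 : 0 < x ∧ x ≤ n ∧ 0 < y + 1 ∧ y + 1 ≤ m ∧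
            |x - r| + |y + 1 - c| ≤ (k' : Int) + 1 - 1
        · simp only [decide_eq_true h3, if_pos h3]
          simp only [add_zero]
          rw [ih x (y + 1) (acc ++ ['r'])]
          cases walkB n m x (y + 1) r c k' <;> simp
        · simp only [decide_eq_false h3, if_neg h3]
          by_cases h4 : 0 < x - 1 ∧ x - 1 ≤ n ∧ 0 < y ∧ y ≤ m ∧
              |x - 1 - r| + |y - c| ≤ (k' : Int) + 1 - 1
          · simp only [decide_eq_true h4, if_pos h4]
            simp only [add_zero, ← sub_eq_add_neg]
            rw [ih (x - 1) y (acc ++ ['u'])]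
            cases walkB n m (x - 1) y r c k' <;> simp
          · simp only [decide_eq_false h4, if_neg h4]

-- the two "impossible" guards agree (Python % 2 of an int is 0 or 1)
lemma guard_iff (a b : Int) :
    (PySem.Int.mod (a - b) 2 = 1 ∨ a < b) ↔ (a < b ∨ PySem.Int.mod (a - b) 2 ≠ 0) := by
  rcases PySem.Int.mod_two_eq (a - b) with h | h <;> simp [h] <;> tauto

theorem solution_spec_aux (n m x y r c k : Int) :
    solution n m x y r c k = solution_alt n m x y r c k := by
  unfold solution solution_alt
  by_cases hg : PySem.Int.mod (k - (|x - r| + |y - c|)) 2 = 1 ∨ k < |x - r| + |y - c|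
  · rw [if_pos hg, if_pos ((guard_iff k (|x - r| + |y - c|)).mp hg)]
  · rw [if_neg hg, if_neg (fun h => hg ((guard_iff k (|x - r| + |y - c|)).mpr h))]
    rw [backT_eq_walk n m r c k.toNat x y []]
    cases walkB n m x y r c k.toNat <;> simp

-- ===== VERDICT (by name: the statement is the Claim_ definition above) =====
theorem solution_spec : Claim_equal_solution := by
  intro n m x y r c k _ _
  unfold Spec_solution
  exact solution_spec_aux n m x y r c k
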